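-- pv_equiv track=rewrite | github.com/Rajshinde25/LP3-assignment | 6.py | countSpecialElements
-- ===== SOURCE A (Python) =====
-- def countSpecialElements(matrix):
--     nRows= len(matrix)
--     nCount=0
--
--     for row in matrix:
--         for indexCol, element in enumerate(row):
--             if element==min(row) or element==max(row):
--                 if row.count(element)>1:
--                     return -1
--                 nCount=nCount+1
--             else:
--                 listColumn=[]
--
--                 for indexRow in range(0, nRows):
--                     listColumn.append(matrix[indexRow][indexCol])
--
--                 if element==min(listColumn) or element==max(listColumn):
--                     if listColumn.count(element)>1:
--                         return -1
--                     nCount=nCount+1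
--     return nCount
-- ===== SOURCE B (Python) =====
-- def countSpecialElements(matrix):
--     # B: precompute per-row stats once per row and per-column min/max/duplication stats
--     # once for the whole matrix (columns gathered in one pass, built lazily on first
--     # need), then classify each cell in O(1); A recomputes min/max/count and rebuilds
--     # the whole column inside the innermost loop.
--     def stats(xs):
--         mn = min(xs)
--         mx = max(xs)
--         return mn, mx, xs.count(mn) > 1, xs.count(mx) > 1
--
--     def build_colstats():
--         ncols = max((len(r) for r in matrix), default=0)
--         cols = [[] for _ in range(ncols)]
--         for row in matrix:
--             for j, v in enumerate(row):
--                 cols[j].append(v)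
--         return [stats(c) for c in cols]
--
--     colstats = None
--     count = 0
--     for row in matrix:
--         if not row:
--             continue
--         rmn, rmx, dmn, dmx = stats(row)
--         for j, v in enumerate(row):
--             if v == rmn or v == rmx:
--                 if (v == rmn and dmn) or (v == rmx and dmx):
--                     return -1
--                 count += 1
--             else:
--                 if colstats is None:
--                     colstats = build_colstats()
--                 cmn, cmx, cdmn, cdmx = colstats[j]
--                 if v == cmn or v == cmx:
--                     if (v == cmn and cdmn) or (v == cmx and cdmx):
--                         return -1
--                     count += 1
--     return count
-- ===== Notes on version B (the rewrite author's own statement) =====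
-- stated objective: faster
-- what changed: B precomputes each row's and each column's min/max and whether they are duplicated once, then classifies every cell with O(1) lookups, instead of A's recomputing min/max/count and rebuilding the whole column inside the innermost loop.
-- outside the precondition, e.g. on countSpecialElements([[1, 2, 3], [4]]): A raises IndexError, B returns 4; on countSpecialElements([[1, 1, 2, 3], [5, 6]]): A returns -1, B returns -1
import Mathlib
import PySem

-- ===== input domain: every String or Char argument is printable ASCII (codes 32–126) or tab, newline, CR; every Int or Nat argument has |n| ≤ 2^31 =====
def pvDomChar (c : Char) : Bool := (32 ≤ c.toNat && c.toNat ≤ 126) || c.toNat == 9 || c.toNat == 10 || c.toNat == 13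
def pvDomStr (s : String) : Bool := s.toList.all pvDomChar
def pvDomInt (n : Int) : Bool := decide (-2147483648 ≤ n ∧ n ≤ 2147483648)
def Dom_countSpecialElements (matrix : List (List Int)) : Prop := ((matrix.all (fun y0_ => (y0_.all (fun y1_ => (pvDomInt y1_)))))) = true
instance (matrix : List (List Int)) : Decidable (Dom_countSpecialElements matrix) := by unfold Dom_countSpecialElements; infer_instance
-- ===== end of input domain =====

-- B computes each row's min/max/duplication stats once per row and all column stats once
-- (columns gathered in a single pass, built lazily on first need), classifying each cell in
-- O(1), where A recomputes min/max/count and rebuilds the column inside the innermost loop.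

-- ===== PORT A =====
-- min(xs) / max(xs); wherever A calls them the list is nonempty, so the default is never used
def pvMin (xs : List Int) : Int := (PySem.List.min? xs (fun x => x)).getD 0
def pvMax (xs : List Int) : Int := (PySem.List.max? xs (fun x => x)).getD 0

-- inner loop 'for indexCol, element in enumerate(row)'; `none` models 'return -1'
def pvACells (matrix : List (List Int)) (nRows : Int) (row : List Int) :
    List (Int × Int) → Int → Option Int
  | [], nCount => some nCount
  | (indexCol, element) :: rest, nCount =>
    if element = pvMin row ∨ element = pvMax row then
      if PySem.List.count row element > 1 then none
      else pvACells matrix nRows row rest (nCount + 1)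
    else
      -- listColumn = [];  for indexRow in range(0, nRows): listColumn.append(matrix[indexRow][indexCol])
      -- (indices are in range on Pre_; out of range Python raises IndexError, excluded by Pre_)
      let listColumn := (PySem.List.pyRange 0 nRows 1).foldl
        (fun acc indexRow =>
          acc ++ [PySem.List.pyGetD (PySem.List.pyGetD matrix indexRow []) indexCol 0]) []
      if element = pvMin listColumn ∨ element = pvMax listColumn then
        if PySem.List.count listColumn element > 1 then none
        else pvACells matrix nRows row rest (nCount + 1)
      else pvACells matrix nRows row rest nCount

-- outer loop 'for row in matrix'
def pvARows (matrix : List (List Int)) (nRows : Int) :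
    List (List Int) → Int → Int
  | [], nCount => nCount
  | row :: rest, nCount =>
    match pvACells matrix nRows row (PySem.List.enumerate row 0) nCount with
    | none => -1
    | some nCount' => pvARows matrix nRows rest nCount'

def countSpecialElements (matrix : List (List Int)) : Int :=
  pvARows matrix (PySem.List.len matrix) matrix 0

-- ===== PORT B =====
-- stats(xs) = (min, max, min duplicated?, max duplicated?); called only on nonempty lists
def pvStats (xs : List Int) : Int × Int × Bool × Bool :=
  let mn := (PySem.List.min? xs (fun x => x)).getD 0
  let mx := (PySem.List.max? xs (fun x => x)).getD 0
  (mn, mx, decide (PySem.List.count xs mn > 1), decide (PySem.List.count xs mx > 1))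

-- ncols = max((len(r) for r in matrix), default=0)
def pvNcols (matrix : List (List Int)) : Nat :=
  PySem.List.maxD (matrix.map List.length) (fun x => x) 0

-- cols = [[] for _ in range(ncols)]; for row in matrix: for j, v in enumerate(row): cols[j].append(v)
def pvCols (matrix : List (List Int)) : List (List Int) :=
  matrix.foldl
    (fun cs row =>
      (PySem.List.enumerate row 0).foldl
        (fun cs2 jv =>
          PySem.List.pySetD cs2 jv.1 (PySem.List.pyGetD cs2 jv.1 [] ++ [jv.2])) cs)
    ((List.range (pvNcols matrix)).map (fun _ => ([] : List Int)))

-- colstats = [stats(c) for c in cols]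
def pvColStats (matrix : List (List Int)) : List (Int × Int × Bool × Bool) :=
  (pvCols matrix).map pvStats

-- inner loop of B; `none` models 'return -1'; the Option state is the lazily built colstats
def pvBCells (matrix : List (List Int)) (rs : Int × Int × Bool × Bool) :
    List (Int × Int) → Int → Option (List (Int × Int × Bool × Bool)) →
      Option (Int × Option (List (Int × Int × Bool × Bool)))
  | [], count, cso => some (count, cso)
  | (j, v) :: rest, count, cso =>
    if v = rs.1 ∨ v = rs.2.1 then
      if (v = rs.1 ∧ rs.2.2.1 = true) ∨ (v = rs.2.1 ∧ rs.2.2.2 = true) then none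
      else pvBCells matrix rs rest (count + 1) cso
    else
      -- if colstats is None: colstats = build_colstats()
      let colstats := cso.getD (pvColStats matrix)
      let cs := PySem.List.pyGetD colstats j (0, 0, false, false)
      if v = cs.1 ∨ v = cs.2.1 then
        if (v = cs.1 ∧ cs.2.2.1 = true) ∨ (v = cs.2.1 ∧ cs.2.2.2 = true) then none
        else pvBCells matrix rs rest (count + 1) (some colstats)
      else pvBCells matrix rs rest count (some colstats)

-- outer loop of B ('if not row: continue' is the empty-row pattern)
def pvBRows (matrix : List (List Int)) :
    List (List Int) → Int → Option (List (Int × Int × Bool × Bool)) → Int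
  | [], count, _ => count
  | [] :: rest, count, cso => pvBRows matrix rest count cso
  | row :: rest, count, cso =>
    match pvBCells matrix (pvStats row) (PySem.List.enumerate row 0) count cso with
    | none => -1
    | some (count', cso') => pvBRows matrix rest count' cso'

def countSpecialElements_alt (matrix : List (List Int)) : Int :=
  pvBRows matrix matrix 0 none

-- ===== PRECONDITION & SPEC =====
-- Pre_ requires every element that is not a min/max of its own row to lie in a fully
-- populated column: that is exactly what keeps A's column construction matrix[indexRow][indexCol]
-- from raising IndexError (it also excludes some ragged inputs on which A happens to return -1
-- before touching a short column; B returns the same -1 there).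
def Pre_countSpecialElements (matrix : List (List Int)) : Prop :=
  ∀ r ∈ matrix, ∀ j ∈ List.range r.length,
    (r.getD j 0 ≠ (PySem.List.min? r (fun x => x)).getD 0 ∧
     r.getD j 0 ≠ (PySem.List.max? r (fun x => x)).getD 0) →
    ∀ r' ∈ matrix, j < r'.length
instance (matrix : List (List Int)) : Decidable (Pre_countSpecialElements matrix) := by
  unfold Pre_countSpecialElements; infer_instance

def pvWitness_countSpecialElements : List (List Int) := [[1, 2, 3], [7, 5, 6], [4, 9, 8]]

def Spec_countSpecialElements (matrix : List (List Int)) (out : Int) : Prop := out = countSpecialElements_alt matrix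
instance (matrix : List (List Int)) (out : Int) : Decidable (Spec_countSpecialElements matrix out) := by unfold Spec_countSpecialElements; infer_instance

-- ===== CLAIM (what is proved, stated in full; the proofs are below) =====
def Claim_equal_countSpecialElements : Prop := ∀ (matrix : List (List Int)), Dom_countSpecialElements matrix → Pre_countSpecialElements matrix → Spec_countSpecialElements matrix (countSpecialElements matrix)

-- ===== LEMMAS AND PROOFS =====

-- duplicate test: when e is the min or the max, 'count e > 1' is B's decoded pair of flags
theorem pv_dup_iff (xs : List Int) (e mn mx : Int) (h : e = mn ∨ e = mx) :
    (PySem.List.count xs e > 1) ↔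
      ((e = mn ∧ decide (PySem.List.count xs mn > 1) = true) ∨
       (e = mx ∧ decide (PySem.List.count xs mx > 1) = true)) := by
  rcases h with rfl | rfl
  · constructor
    · intro h; exact Or.inl ⟨rfl, by simpa using h⟩
    · rintro (⟨-, h⟩ | ⟨rfl, h⟩) <;> simpa using h
  · constructor
    · intro h; exact Or.inr ⟨rfl, by simpa using h⟩
    · rintro (⟨rfl, h⟩ | ⟨-, h⟩) <;> simpa using h

-- on a rectangular matrix, the column A rebuilds equals the column B extracts once
theorem pv_col_eq (matrix : List (List Int)) (j : Int) (h0 : 0 ≤ j)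
    (hall : ∀ r ∈ matrix, j.toNat < r.length) :
    (PySem.List.pyRange 0 (PySem.List.len matrix) 1).foldl
      (fun acc indexRow =>
        acc ++ [PySem.List.pyGetD (PySem.List.pyGetD matrix indexRow []) j 0]) []
    = matrix.filterMap (fun r => r[j.toNat]?) := by
  rw [show (PySem.List.pyRange 0 (PySem.List.len matrix) 1) = (PySem.List.pyRange 0 (PySem.List.len matrix)) from rfl]
  rw [PySem.List.foldl_pyRange_zero_pyGetD matrix []
    (fun acc r => acc ++ [PySem.List.pyGetD r j 0]) []]
  induction matrix with
  | nil => rfl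
  | cons r rest ih =>
    have hr : j.toNat < r.length := hall r (by simp)
    have hget : PySem.List.pyGetD r j 0 = r[j.toNat] :=
      PySem.List.pyGetD_eq_getElem r 0 h0 (by omega)
    rw [List.foldl_cons, PySem.List.foldl_append_singleton_eq_map,
        List.filterMap_cons]
    have hsome : r[j.toNat]? = some r[j.toNat] := List.getElem?_eq_getElem (by omega)
    rw [hsome]
    have := ih (fun s hs => hall s (by simp [hs]))
    rw [PySem.List.foldl_append_singleton_eq_map] at this
    simp only [List.nil_append] at this ⊢
    simp [hget, this]

-- one row of B's bucketing pass, at any start offset: position i gains row[i - s]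
theorem pv_row_aux (row : List Int) : ∀ (s : Nat) (cols : List (List Int)),
    s + row.length ≤ cols.length →
    (PySem.List.enumerate row (s : Int)).foldl
      (fun cs2 jv => PySem.List.pySetD cs2 jv.1 (PySem.List.pyGetD cs2 jv.1 [] ++ [jv.2])) cols
    = cols.mapIdx (fun i c =>
        if s ≤ i ∧ i < s + row.length then c ++ [row.getD (i - s) 0] else c) := by
  induction row with
  | nil =>
    intro s cols _
    rw [PySem.List.enumerate_nil, List.foldl_nil]
    refine (List.ext_getElem (by simp) ?_).symm
    intro i h1 h2
    simp only [List.getElem_mapIdx]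
    rw [if_neg (by simp only [List.length_nil]; omega)]
  | cons v vs ih =>
    intro s cols hlen
    have hs : s < cols.length := by simp at hlen; omega
    rw [PySem.List.enumerate_cons, List.foldl_cons]
    have hget : PySem.List.pyGetD cols (s : Int) [] = cols[s] :=
      PySem.List.pyGetD_eq_getElem cols [] (by omega) (by exact_mod_cast hs)
    have hset : PySem.List.pySetD cols (s : Int) (cols[s] ++ [v]) = cols.set s (cols[s] ++ [v]) := by
      simp [PySem.List.pySetD, PySem.List.pySet?, PySem.List.pyIdx?, hs]
    have hcast : (s : Int) + 1 = ((s + 1 : Nat) : Int) := by push_cast; ring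
    rw [hget, hset, hcast, ih (s + 1) _ (by simp at hlen ⊢; omega)]
    refine List.ext_getElem (by simp) ?_
    intro i h1 h2
    simp only [List.getElem_mapIdx, List.getElem_set]
    by_cases hi : s = i
    · subst hi
      rw [if_neg (by omega), if_pos (show s ≤ s ∧ s < s + (v :: vs).length from ⟨le_rfl, by simp⟩)]
      simp
    · rw [if_neg hi]
      by_cases hcond : s + 1 ≤ i ∧ i < s + 1 + vs.length
      · rw [if_pos hcond, if_pos (by simp only [List.length_cons]; omega)]
        have : i - s = (i - (s + 1)) + 1 := by omega
        rw [this, List.getD_cons_succ]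
      · rw [if_neg hcond, if_neg (by simp only [List.length_cons]; omega)]

-- the bucketing pass over all rows produces exactly the columns B needs
theorem pv_rows_fold (n : Nat) : ∀ (rows pre : List (List Int)),
    (∀ r ∈ rows, r.length ≤ n) →
    rows.foldl
      (fun cs row =>
        (PySem.List.enumerate row 0).foldl
          (fun cs2 jv =>
            PySem.List.pySetD cs2 jv.1 (PySem.List.pyGetD cs2 jv.1 [] ++ [jv.2])) cs)
      ((List.range n).map (fun j => pre.filterMap (fun r => r[j]?)))
    = (List.range n).map (fun j => (pre ++ rows).filterMap (fun r => r[j]?)) := by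
  intro rows
  induction rows with
  | nil => intro pre _; simp
  | cons row rest ih =>
    intro pre hb
    have hrow : row.length ≤ n := hb row (by simp)
    rw [List.foldl_cons]
    have hstep :
        (PySem.List.enumerate row 0).foldl
          (fun cs2 jv =>
            PySem.List.pySetD cs2 jv.1 (PySem.List.pyGetD cs2 jv.1 [] ++ [jv.2]))
          ((List.range n).map (fun j => pre.filterMap (fun r => r[j]?)))
        = (List.range n).map (fun j => (pre ++ [row]).filterMap (fun r => r[j]?)) := by
      rw [show ((0 : Int)) = ((0 : Nat) : Int) from rfl,
          pv_row_aux row 0 _ (by simp; omega)]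
      refine List.ext_getElem (by simp) ?_
      intro i h1 h2
      have hin : i < n := by simpa using h2
      simp only [List.getElem_mapIdx, List.getElem_map, List.getElem_range]
      rw [List.filterMap_append]
      by_cases hi : i < row.length
      · rw [if_pos (by omega)]
        have : [row].filterMap (fun r => r[i]?) = [row[i]] := by
          simp [List.getElem?_eq_getElem hi]
        rw [this]
        simp [List.getElem?_eq_getElem hi]
      · rw [if_neg (by omega)]
        have : [row].filterMap (fun r => r[i]?) = [] := by
          simp [List.getElem?_eq_none (by omega : row.length ≤ i)]
        simp [this]
    rw [hstep, ih (pre ++ [row]) (fun r hr => hb r (by simp [hr]))]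
    simp

-- B's cols equal the per-column extractions
theorem pv_cols_spec (matrix : List (List Int)) :
    pvCols matrix
      = (List.range (pvNcols matrix)).map (fun j => matrix.filterMap (fun r => r[j]?)) := by
  unfold pvCols
  have hinit : (List.range (pvNcols matrix)).map (fun _ => ([] : List Int))
      = (List.range (pvNcols matrix)).map (fun j => ([] : List (List Int)).filterMap (fun r => r[j]?)) := by
    simp
  rw [hinit, pv_rows_fold (pvNcols matrix) matrix []
    (fun r hr => PySem.List.le_maxD_id (matrix.map List.length) 0 r.length (List.mem_map_of_mem hr))]
  simp

-- B's colstats table, looked up at a valid column index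
theorem pv_colstats_lookup (matrix : List (List Int)) (j : Int)
    (h0 : 0 ≤ j) (hj : j.toNat < pvNcols matrix) :
    PySem.List.pyGetD (pvColStats matrix) j (0, 0, false, false)
      = pvStats (matrix.filterMap (fun r => r[j.toNat]?)) := by
  have hcs : pvColStats matrix
      = (List.range (pvNcols matrix)).map
          (fun j => pvStats (matrix.filterMap (fun r => r[j]?))) := by
    rw [pvColStats, pv_cols_spec, List.map_map]
    rfl
  have hlen : (pvColStats matrix).length = pvNcols matrix := by
    rw [hcs]; simp
  rw [PySem.List.pyGetD_eq_getElem _ _ h0 (by rw [hlen]; omega)]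
  rw [List.getElem_of_eq hcs]
  simp

-- the inner loops agree (the lazily built colstats is always B's full table)
theorem pv_cells_eq (matrix : List (List Int)) (row : List Int)
    (hrow : row.length ≤ pvNcols matrix) :
    ∀ (cells : List (Int × Int)) (c : Int)
      (cso : Option (List (Int × Int × Bool × Bool))),
      (cso = none ∨ cso = some (pvColStats matrix)) →
      (∀ p ∈ cells, 0 ≤ p.1 ∧ p.1.toNat < row.length ∧
        (¬(p.2 = pvMin row ∨ p.2 = pvMax row) → ∀ r' ∈ matrix, p.1.toNat < r'.length)) →
      (pvACells matrix (PySem.List.len matrix) row cells c = none ∧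
        pvBCells matrix (pvStats row) cells c cso = none) ∨
      (∃ c' cso', pvACells matrix (PySem.List.len matrix) row cells c = some c' ∧
        pvBCells matrix (pvStats row) cells c cso = some (c', cso') ∧
        (cso' = none ∨ cso' = some (pvColStats matrix))) := by
  intro cells
  induction cells with
  | nil => intro c cso hinv _; exact Or.inr ⟨c, cso, rfl, rfl, hinv⟩
  | cons p rest ih =>
    intro c cso hinv hb
    obtain ⟨j, e⟩ := p
    have hj := hb (j, e) (by simp)
    have hrest : ∀ p ∈ rest, 0 ≤ p.1 ∧ p.1.toNat < row.length ∧
        (¬(p.2 = pvMin row ∨ p.2 = pvMax row) → ∀ r' ∈ matrix, p.1.toNat < r'.length) :=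
      fun p hp => hb p (by simp [hp])
    have hstats : pvStats row = (pvMin row, pvMax row,
        decide (PySem.List.count row (pvMin row) > 1),
        decide (PySem.List.count row (pvMax row) > 1)) := by
      simp [pvStats, pvMin, pvMax]
    rw [pvACells, pvBCells.eq_def, hstats]
    by_cases hrowext : e = pvMin row ∨ e = pvMax row
    · simp only [hrowext, if_pos]
      rw [if_congr (pv_dup_iff row e (pvMin row) (pvMax row) hrowext) rfl rfl]
      split
      · exact Or.inl ⟨rfl, rfl⟩
      · exact ih (c + 1) cso hinv hrest
    · simp only [hrowext, if_false]
      have hforced : cso.getD (pvColStats matrix) = pvColStats matrix := by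
        rcases hinv with rfl | rfl <;> rfl
      rw [hforced]
      have hall : ∀ r' ∈ matrix, j.toNat < r'.length := hj.2.2 hrowext
      have hcol := pv_col_eq matrix j hj.1 hall
      have hlook := pv_colstats_lookup matrix j hj.1 (lt_of_lt_of_le hj.2.1 hrow)
      set colA := (PySem.List.pyRange 0 (PySem.List.len matrix) 1).foldl
        (fun acc indexRow =>
          acc ++ [PySem.List.pyGetD (PySem.List.pyGetD matrix indexRow []) j 0]) [] with hColA
      have hcs : PySem.List.pyGetD (pvColStats matrix) j (0, 0, false, false)
          = (pvMin colA, pvMax colA,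
             decide (PySem.List.count colA (pvMin colA) > 1),
             decide (PySem.List.count colA (pvMax colA) > 1)) := by
        rw [hlook, ← hcol]; simp [pvStats, pvMin, pvMax]
      rw [hcs]
      by_cases hcolext : e = pvMin colA ∨ e = pvMax colA
      · simp only [hcolext, if_pos]
        rw [if_congr (pv_dup_iff colA e (pvMin colA) (pvMax colA) hcolext) rfl rfl]
        split
        · exact Or.inl ⟨rfl, rfl⟩
        · exact ih (c + 1) (some (pvColStats matrix)) (Or.inr rfl) hrest
      · simp only [hcolext, if_false]
        exact ih c (some (pvColStats matrix)) (Or.inr rfl) hrest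

-- the outer loops agree
theorem pv_rows_eq (matrix : List (List Int)) (hpre : Pre_countSpecialElements matrix) :
    ∀ (rows : List (List Int)) (c : Int)
      (cso : Option (List (Int × Int × Bool × Bool))),
      (cso = none ∨ cso = some (pvColStats matrix)) →
      (∀ r ∈ rows, r ∈ matrix) →
      pvARows matrix (PySem.List.len matrix) rows c = pvBRows matrix rows c cso := by
  intro rows
  induction rows with
  | nil => intro c cso _ _; rfl
  | cons row rest ih =>
    intro c cso hinv hmem
    have hrowmem : row ∈ matrix := hmem row (by simp)
    have hrestmem : ∀ r ∈ rest, r ∈ matrix := fun r hr => hmem r (by simp [hr])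
    match row, hrowmem with
    | [], _ =>
      rw [pvARows, pvBRows]
      have : pvACells matrix (PySem.List.len matrix) [] (PySem.List.enumerate [] 0) c
          = some c := by rw [PySem.List.enumerate_nil]; rfl
      rw [this]
      exact ih c cso hinv hrestmem
    | (x :: xs), hrowmem =>
      rw [pvARows, pvBRows]
      have hrow : (x :: xs).length ≤ pvNcols matrix :=
        PySem.List.le_maxD_id (matrix.map List.length) 0 (x :: xs).length
          (List.mem_map_of_mem hrowmem)
      have hcells : ∀ p ∈ PySem.List.enumerate (x :: xs) 0,
          0 ≤ p.1 ∧ p.1.toNat < (x :: xs).length ∧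
          (¬(p.2 = pvMin (x :: xs) ∨ p.2 = pvMax (x :: xs)) →
            ∀ r' ∈ matrix, p.1.toNat < r'.length) := by
        intro p hp
        rw [PySem.List.mem_enumerate_iff] at hp
        obtain ⟨k, hk, rfl⟩ := hp
        refine ⟨by simp, by simp only [zero_add, Int.toNat_natCast]; omega, ?_⟩
        intro hne
        have hgd : (x :: xs).getD k 0 = (x :: xs)[k] := List.getD_eq_getElem _ _ hk
        have := hpre (x :: xs) hrowmem k (by simpa using hk)
          (by
            rw [hgd]
            constructor
            · intro h; exact hne (Or.inl (by simpa [pvMin] using h))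
            · intro h; exact hne (Or.inr (by simpa [pvMax] using h)))
        simpa using this
      rcases pv_cells_eq matrix (x :: xs) hrow (PySem.List.enumerate (x :: xs) 0) c cso
        hinv hcells with ⟨ha, hbv⟩ | ⟨c', cso', ha, hbv, hinv'⟩
      · rw [ha, hbv]
      · rw [ha, hbv]
        exact ih c' cso' hinv' hrestmem
      · simp

-- ===== VERDICT (by name: the statement is the Claim_ definition above) =====
theorem countSpecialElements_spec : Claim_equal_countSpecialElements := by
  intro matrix _hdom hpre
  unfold Spec_countSpecialElements countSpecialElements countSpecialElements_alt
  exact pv_rows_eq matrix hpre matrix 0 none (Or.inl rfl) (fun _ h => h)
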